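-- pv_equiv track=rewrite | github.com/AIGNITEHUB/tb_resistance_mvp | tb_resistance_mvp/pipeline.py | _group_mutations_by_class
-- ===== SOURCE A (Python) =====
-- def _group_mutations_by_class(high_risk_mutations: list) -> dict:
--     """Group high-risk mutations by physicochemical class."""
--     grouped = {}
--     for mut in high_risk_mutations:
--         group = mut["group"]
--         if group not in grouped:
--             grouped[group] = []
--         grouped[group].append(mut)
--     return grouped
-- ===== SOURCE B (Python) =====
-- def _group_mutations_by_class(high_risk_mutations: list) -> dict:
--     """Group high-risk mutations by physicochemical class."""
--     keys = list(dict.fromkeys(m["group"] for m in high_risk_mutations))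
--     return {k: [m for m in high_risk_mutations if m["group"] == k] for k in keys}
-- ===== Notes on version B (the rewrite author's own statement) =====
-- stated objective: alternative
-- what changed: Replaces the one-pass mutate-a-dict-of-lists accumulation with a two-phase build: dedup the group keys in first-occurrence order, then one comprehension filtering the input per key.
import Mathlib
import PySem

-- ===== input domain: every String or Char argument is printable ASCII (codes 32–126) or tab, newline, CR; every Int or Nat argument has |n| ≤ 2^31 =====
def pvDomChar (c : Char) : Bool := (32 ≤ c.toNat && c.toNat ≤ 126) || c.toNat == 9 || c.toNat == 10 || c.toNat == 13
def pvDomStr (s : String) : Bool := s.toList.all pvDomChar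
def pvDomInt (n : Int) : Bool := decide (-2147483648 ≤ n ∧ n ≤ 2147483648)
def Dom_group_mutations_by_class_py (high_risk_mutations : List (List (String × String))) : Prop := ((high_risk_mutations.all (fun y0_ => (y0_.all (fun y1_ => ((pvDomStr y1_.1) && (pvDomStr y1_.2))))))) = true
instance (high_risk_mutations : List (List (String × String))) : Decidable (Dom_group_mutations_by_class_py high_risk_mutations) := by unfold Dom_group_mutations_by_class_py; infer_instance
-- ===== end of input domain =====

-- B builds the grouping in two phases (dedup the group keys in first-occurrence order,
-- then filter the input once per key) instead of A's one-pass mutate-a-dict-of-lists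
-- accumulation; an alternative decomposition, not claimed faster.

-- ===== PORT A =====
def group_mutations_by_class_py (high_risk_mutations : List (List (String × String))) : List (String × List (List (String × String))) :=
  -- grouped = {}; for mut in …: group = mut["group"]; if group not in grouped: grouped[group] = []; grouped[group].append(mut); return grouped
  (high_risk_mutations.foldl
    (fun grouped mu =>
      let group := (PySem.Dict.mk mu).getD "group" ""   -- mut["group"]; the default is unreachable under Pre_
      let grouped := if grouped.contains group then grouped else grouped.insert group []
      grouped.modify group [] (fun l => l ++ [mu]))
    PySem.Dict.empty).items

-- ===== PORT B =====
def group_mutations_by_class_py_alt (high_risk_mutations : List (List (String × String))) : List (String × List (List (String × String))) :=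
  -- keys = list(dict.fromkeys(m["group"] for m in …)); return {k: [m for m in … if m["group"] == k] for k in keys}
  let keys := PySem.List.dedup (high_risk_mutations.map (fun m => (PySem.Dict.mk m).getD "group" ""))
  keys.map (fun k => (k, high_risk_mutations.filter (fun m => (PySem.Dict.mk m).getD "group" "" == k)))

-- ===== PRECONDITION & SPEC =====
-- Pre_ excludes exactly the inputs where some mutation dict lacks a "group" key: there Python A (and B) raises KeyError.
def Pre_group_mutations_by_class_py (high_risk_mutations : List (List (String × String))) : Prop :=
  ∀ m ∈ high_risk_mutations, (PySem.Dict.mk m).contains "group" = true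
instance (high_risk_mutations : List (List (String × String))) : Decidable (Pre_group_mutations_by_class_py high_risk_mutations) := by unfold Pre_group_mutations_by_class_py; infer_instance

def pvWitness_group_mutations_by_class_py : (List (List (String × String))) :=
  [[("group", "katG"), ("pos", "315")], [("group", "rpoB")], [("group", "katG"), ("pos", "463")]]

def Spec_group_mutations_by_class_py (high_risk_mutations : List (List (String × String))) (out : List (String × List (List (String × String)))) : Prop := out = group_mutations_by_class_py_alt high_risk_mutations
instance (high_risk_mutations : List (List (String × String))) (out : List (String × List (List (String × String)))) : Decidable (Spec_group_mutations_by_class_py high_risk_mutations out) := by unfold Spec_group_mutations_by_class_py; infer_instance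

-- ===== CLAIM (what is proved, stated in full; the proofs are below) =====
def Claim_equal_group_mutations_by_class_py : Prop := ∀ (high_risk_mutations : List (List (String × String))), Dom_group_mutations_by_class_py high_risk_mutations → Pre_group_mutations_by_class_py high_risk_mutations → Spec_group_mutations_by_class_py high_risk_mutations (group_mutations_by_class_py high_risk_mutations)

-- ===== LEMMAS AND PROOFS =====

-- the group key of one mutation dict
def pvK (m : List (String × String)) : String := (PySem.Dict.mk m).getD "group" ""

-- A's loop body (ensure the key exists, then append) is exactly one `modify` with default [].
theorem pvStep_eq_modify (d : PySem.Dict String (List (List (String × String)))) (g : String)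
    (mu : List (String × String)) :
    ((if d.contains g then d else d.insert g []).modify g [] (fun l => l ++ [mu]))
      = d.modify g [] (fun l => l ++ [mu]) := by
  by_cases h : d.contains g = true
  · rw [if_pos h]
  · rw [if_neg h]
    have h' : d.contains g = false := by simpa using h
    have hany : (d.items.any fun p => p.1 == g) = false := h'
    have hnog : ∀ p ∈ d.items, ¬ (p.1 == g) = true := by
      simpa [List.any_eq_false] using hany
    have h1 : d.insert g [] = ⟨d.items ++ [(g, [])]⟩ :=
      PySem.Dict.ext (PySem.Dict.items_insert_of_not_contains d [] h')
    rw [h1]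
    unfold PySem.Dict.modify
    have h2 : (⟨d.items ++ [(g, [])]⟩ : PySem.Dict String (List (List (String × String)))).getD g [] = [] := by
      unfold PySem.Dict.getD PySem.Dict.get?
      simp [List.find?_append, List.find?_eq_none.mpr hnog]
    have h3 : d.getD g [] = [] := PySem.Dict.getD_of_not_contains d [] h'
    rw [h2, h3]
    apply PySem.Dict.ext
    have hcont : (⟨d.items ++ [(g, [])]⟩ : PySem.Dict String (List (List (String × String)))).contains g = true := by
      unfold PySem.Dict.contains
      simp
    rw [PySem.Dict.items_insert_of_contains _ _ hcont, PySem.Dict.items_insert_of_not_contains d _ h']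
    show (d.items ++ [(g, [])]).map _ = _
    rw [List.map_append]
    congr 1
    · have : ∀ p ∈ d.items, (if (p.1 == g) = true then (g, ([] : List (List (String × String))) ++ [mu]) else p) = p := by
        intro p hp; rw [if_neg (hnog p hp)]
      rw [List.map_congr_left this, List.map_id']
    · simp

theorem pvGetD (hrm : List (List (String × String))) (c : String) :
    ((hrm.foldl (fun grouped mu => grouped.modify (pvK mu) [] (fun l => l ++ [mu])) PySem.Dict.empty).getD c [])
    = hrm.filter (fun m => pvK m == c) := by
  have hfuse : (hrm.map (fun m => (pvK m, m))).foldl (fun d p => d.modify p.1 [] (fun l => l ++ [p.2])) PySem.Dict.empty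
      = hrm.foldl (fun grouped mu => grouped.modify (pvK mu) [] (fun l => l ++ [mu])) PySem.Dict.empty := by
    rw [List.foldl_map]
  rw [← hfuse, PySem.Dict.getD_foldl_modify_append]
  simp [List.filter_map, Function.comp_def]

theorem pvKeys (hrm : List (List (String × String))) :
    ((hrm.foldl (fun grouped mu => grouped.modify (pvK mu) [] (fun l => l ++ [mu])) PySem.Dict.empty).keys)
    = PySem.List.dedup (hrm.map pvK) := by
  rw [PySem.Dict.keys_foldl_modify_key]
  simp [PySem.Dict.keys_empty, PySem.Set.update_nil_left]

theorem pvNodup (hrm : List (List (String × String))) :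
    ((hrm.foldl (fun grouped mu => grouped.modify (pvK mu) [] (fun l => l ++ [mu])) PySem.Dict.empty).keys).Nodup :=
  PySem.Dict.nodup_keys_foldl_modify_key hrm pvK [] (fun _ mu l => l ++ [mu]) PySem.Dict.empty (by simp [PySem.Dict.keys_empty])

theorem pvMain (hrm : List (List (String × String))) :
    (hrm.foldl
      (fun grouped mu =>
        let group := pvK mu
        let grouped := if grouped.contains group then grouped else grouped.insert group []
        grouped.modify group [] (fun l => l ++ [mu]))
      PySem.Dict.empty).items
    = (PySem.List.dedup (hrm.map pvK)).map (fun k => (k, hrm.filter (fun m => pvK m == k))) := by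
  have hstep : (fun (grouped : PySem.Dict String (List (List (String × String)))) mu =>
        let group := pvK mu
        let grouped := if grouped.contains group then grouped else grouped.insert group []
        grouped.modify group [] (fun l => l ++ [mu]))
      = fun grouped mu => grouped.modify (pvK mu) [] (fun l => l ++ [mu]) := by
    funext d mu
    exact pvStep_eq_modify d (pvK mu) mu
  rw [hstep, PySem.Dict.items_eq_map_keys _ (pvNodup hrm) [], pvKeys]
  exact List.map_congr_left (fun k _ => by rw [pvGetD])

-- ===== VERDICT (by name: the statement is the Claim_ definition above) =====
theorem group_mutations_by_class_py_spec : Claim_equal_group_mutations_by_class_py := by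
  intro hrm _ _
  unfold Spec_group_mutations_by_class_py group_mutations_by_class_py group_mutations_by_class_py_alt
  exact pvMain hrm
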